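-- pv_equiv track=rewrite | github.com/kobe24o/LeetCode | algorithm/Python3_version/leetcode660.py | newInteger
-- ===== SOURCE A (Python) =====
-- def newInteger(n: int) -> int:
--     num = []
--     while n:
--         num.append(n%9)
--         n //= 9
--     ans = 0
--     for i in range(len(num)-1,-1,-1):
--         ans = ans*10+num[i]
--     return ans
-- ===== SOURCE B (Python) =====
-- def newInteger(n: int) -> int:
--     if not n:
--         return 0
--     p = 1
--     while p * 9 <= n:
--         p *= 9
--     ans = 0
--     while p:
--         ans = ans * 10 + n // p
--         n %= p
--         p //= 9
--     return ans
-- ===== Notes on version B (the rewrite author's own statement) =====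
-- stated objective: alternative
-- what changed: A extracts base-9 digits least-significant-first into a list and then re-reads the list back-to-front; B never builds a list: it first finds the highest power of 9 not exceeding n, then extracts digits most-significant-first by greedy division and remainder with descending powers of 9.
import Mathlib
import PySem

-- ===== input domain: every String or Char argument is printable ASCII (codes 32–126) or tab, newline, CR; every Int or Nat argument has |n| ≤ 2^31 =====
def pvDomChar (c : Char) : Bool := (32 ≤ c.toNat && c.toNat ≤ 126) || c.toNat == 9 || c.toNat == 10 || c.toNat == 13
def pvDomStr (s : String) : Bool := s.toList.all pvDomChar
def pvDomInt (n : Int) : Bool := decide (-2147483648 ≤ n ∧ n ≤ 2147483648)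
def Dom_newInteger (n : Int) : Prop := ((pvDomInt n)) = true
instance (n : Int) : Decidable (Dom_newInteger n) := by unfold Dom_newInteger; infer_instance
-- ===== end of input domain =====

-- B replaces A's LSB-first digit-list construction + reverse read with an MSB-first greedy
-- extraction: find the highest power of 9 not exceeding n, then peel digits by division and
-- remainder by descending powers; objective: alternative (no intermediate list, opposite order).

-- termination helper for the division-by-9 loops (cited by name in decreasing_by)
theorem pvDiv9_lt (n : Int) (h : 0 < n) : (PySem.Int.floordiv n 9).toNat < n.toNat := by
  rw [PySem.Int.floordiv_eq_ediv_of_pos (by norm_num)]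
  have h1 := Int.mul_ediv_add_emod n 9
  have h2 := Int.emod_nonneg n (by norm_num : (9:Int) ≠ 0)
  have h3 := Int.emod_lt_of_pos n (by norm_num : (0:Int) < 9)
  omega

-- ===== PORT A =====
-- the 'while n' loop: append n%9, n //= 9 (guard n ≤ 0 makes the port total; Python returns only for n ≥ 0, see Pre_)
def newIntegerLoopA (n : Int) (num : List Int) : List Int :=
  if _h : n ≤ 0 then num
  else newIntegerLoopA (PySem.Int.floordiv n 9) (num ++ [PySem.Int.mod n 9])
termination_by n.toNat
decreasing_by exact pvDiv9_lt n (by omega)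

def newInteger (n : Int) : Int :=
  let num := newIntegerLoopA n []
  -- for i in range(len(num)-1,-1,-1): ans = ans*10 + num[i]
  (PySem.List.pyRange ((num.length : Int) - 1) (-1) (-1)).foldl
    (fun ans i => ans * 10 + PySem.List.pyGetD num i 0) 0

-- ===== PORT B =====
-- while p * 9 <= n: p *= 9   (the 0 < p conjunct only makes the recursion total; at the call p = 1)
def pvPow9 (n p : Int) : Int :=
  if h : p * 9 ≤ n ∧ 0 < p then pvPow9 n (p * 9) else p
termination_by (n.toNat + 1 - p.toNat)
decreasing_by
  obtain ⟨h1, _h2⟩ := h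
  omega

-- while p: ans = ans*10 + n//p; n %= p; p //= 9
def pvReadB (p n ans : Int) : Int :=
  if _h : p ≤ 0 then ans
  else pvReadB (PySem.Int.floordiv p 9) (PySem.Int.mod n p) (ans * 10 + PySem.Int.floordiv n p)
termination_by p.toNat
decreasing_by exact pvDiv9_lt p (by omega)

def newInteger_alt (n : Int) : Int :=
  if n = 0 then 0 else pvReadB (pvPow9 n 1) n 0

-- ===== PRECONDITION & SPEC =====
-- Python A terminates exactly on n ≥ 0 (for n < 0 the 'while n' loop never ends: n//9 reaches -1 and stays)
def Pre_newInteger (n : Int) : Prop := 0 ≤ n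
instance (n : Int) : Decidable (Pre_newInteger n) := by unfold Pre_newInteger; infer_instance
def pvWitness_newInteger : Int := 5

def Spec_newInteger (n : Int) (out : Int) : Prop := out = newInteger_alt n
instance (n : Int) (out : Int) : Decidable (Spec_newInteger n out) := by unfold Spec_newInteger; infer_instance

-- ===== CLAIM =====
def Claim_equal_newInteger : Prop := ∀ (n : Int), Dom_newInteger n → Pre_newInteger n → Spec_newInteger n (newInteger n)

-- ===== LEMMAS AND PROOFS =====

-- the mathematical value both programs compute: base-9 digits of n read in base 10
def pvF (n : Int) : Int :=
  if _h : n ≤ 0 then 0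
  else pvF (PySem.Int.floordiv n 9) * 10 + PySem.Int.mod n 9
termination_by n.toNat
decreasing_by exact pvDiv9_lt n (by omega)

theorem pvF_small (n : Int) (h0 : 0 ≤ n) (h9 : n < 9) : pvF n = n := by
  by_cases h : n ≤ 0
  · rw [pvF]; simp [h]; omega
  · rw [pvF, dif_neg h, PySem.Int.floordiv_eq_ediv_of_pos (by norm_num),
        PySem.Int.mod_eq_emod_of_pos (by norm_num)]
    have hd : n / 9 = 0 := Int.ediv_eq_zero_of_lt (by omega) h9
    have hm : n % 9 = n := Int.emod_eq_of_lt (by omega) h9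
    rw [hd, hm, pvF]; simp

-- ---- A-side: A computes pvF ----

def pvEvalL (xs : List Int) : Int := xs.foldr (fun d acc => d + 10 * acc) 0

theorem pvEvalL_nil : pvEvalL [] = 0 := rfl

theorem pvEvalL_cons (d : Int) (xs : List Int) : pvEvalL (d :: xs) = d + 10 * pvEvalL xs := rfl

theorem pvEvalL_append_singleton (xs : List Int) (d : Int) :
    pvEvalL (xs ++ [d]) = pvEvalL xs + d * 10 ^ xs.length := by
  induction xs with
  | nil => simp [pvEvalL]
  | cons x xs ih =>
    rw [List.cons_append, pvEvalL_cons, pvEvalL_cons, ih, List.length_cons]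
    ring

theorem pvEvalL_take_succ (num : List Int) (j : ℕ) :
    pvEvalL (num.take (j + 1)) = pvEvalL (num.take j) + PySem.List.pyGetD num (j : Int) 0 * 10 ^ j := by
  rw [PySem.List.pyGetD_natCast]
  by_cases hj : j < num.length
  · rw [List.take_add_one, List.getElem?_eq_getElem hj]
    simp only [Option.toList]
    rw [pvEvalL_append_singleton, List.length_take,
        List.getD_eq_getElem num 0 hj, Nat.min_eq_left (Nat.le_of_lt hj)]
  · have hlen : num.length ≤ j := by omega
    rw [List.take_of_length_le (by omega), List.take_of_length_le hlen,
        List.getD_eq_default num 0 hlen]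
    simp

theorem pvFold_desc (num : List Int) (k : ℕ) (a : Int) :
    (PySem.List.pyRange (k : Int) (-1) (-1)).foldl
      (fun ans i => ans * 10 + PySem.List.pyGetD num i 0) a
      = a * 10 ^ (k + 1) + pvEvalL (num.take (k + 1)) := by
  induction k generalizing a with
  | zero =>
    rw [show ((0 : ℕ) : Int) = 0 by norm_num,
        PySem.List.pyRange_neg_one_cons (by norm_num),
        PySem.List.pyRange_neg_one_eq_nil (by norm_num)]
    simp only [List.foldl_cons, List.foldl_nil]
    rw [pvEvalL_take_succ num 0, List.take_zero, pvEvalL_nil]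
    norm_num
  | succ k ih =>
    rw [show ((k + 1 : ℕ) : Int) = (k : Int) + 1 by push_cast; ring,
        PySem.List.pyRange_neg_one_cons (by omega)]
    simp only [List.foldl_cons, add_sub_cancel_right]
    rw [ih, pvEvalL_take_succ num (k + 1)]
    push_cast
    ring

theorem pvLoopA_append (n : Int) (num : List Int) :
    newIntegerLoopA n num = num ++ newIntegerLoopA n [] := by
  by_cases h : n ≤ 0
  · conv_lhs => rw [newIntegerLoopA]
    conv_rhs => rw [newIntegerLoopA]
    simp [h]
  · conv_lhs => rw [newIntegerLoopA]
    conv_rhs => rw [newIntegerLoopA]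
    simp only [h, dite_false]
    rw [pvLoopA_append (PySem.Int.floordiv n 9) (num ++ [PySem.Int.mod n 9]),
        pvLoopA_append (PySem.Int.floordiv n 9) ([] ++ [PySem.Int.mod n 9])]
    simp
termination_by n.toNat
decreasing_by all_goals exact pvDiv9_lt n (by omega)

theorem pvEval_loopA (n : Int) : pvEvalL (newIntegerLoopA n []) = pvF n := by
  by_cases h : n ≤ 0
  · rw [newIntegerLoopA, pvF]; simp [h, pvEvalL_nil]
  · conv_lhs => rw [newIntegerLoopA]
    rw [pvF, dif_neg h]
    simp only [h, dite_false]
    rw [pvLoopA_append, List.nil_append, List.singleton_append, pvEvalL_cons,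
        pvEval_loopA (PySem.Int.floordiv n 9)]
    ring
termination_by n.toNat
decreasing_by all_goals exact pvDiv9_lt n (by omega)

theorem pvA_eval (n : Int) : newInteger n = pvF n := by
  rw [← pvEval_loopA]
  show (PySem.List.pyRange (((newIntegerLoopA n []).length : Int) - 1) (-1) (-1)).foldl
      (fun ans i => ans * 10 + PySem.List.pyGetD (newIntegerLoopA n []) i 0) 0
      = pvEvalL (newIntegerLoopA n [])
  generalize newIntegerLoopA n [] = m
  cases m with
  | nil =>
    rw [PySem.List.pyRange_neg_one_eq_nil (by simp)]
    simp [pvEvalL_nil]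
  | cons d rest =>
    have hcast : (((d :: rest).length : ℕ) : Int) - 1 = ((rest.length : ℕ) : Int) := by
      rw [List.length_cons]; push_cast; ring
    rw [hcast, pvFold_desc (d :: rest) rest.length 0,
        List.take_of_length_le (by simp)]
    ring

-- ---- B-side: B computes pvF ----

-- splitting the base-9 digit string of n at position m
theorem pvF_split (m : ℕ) (n : Int) (hn : 0 ≤ n) :
    pvF n = pvF (n / 9 ^ m) * 10 ^ m + pvF (n % 9 ^ m) := by
  induction m generalizing n with
  | zero =>
    have : pvF 0 = 0 := by rw [pvF]; simp
    simp [this]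
  | succ m ih =>
    by_cases h0 : n ≤ 0
    · have hn0 : n = 0 := le_antisymm h0 hn
      subst hn0
      have : pvF 0 = 0 := by rw [pvF]; simp
      simp [this]
    · have hP : (0:Int) < 9 ^ m := by positivity
      have hP1 : (0:Int) < 9 ^ (m+1) := by positivity
      have hdd : n / 9 / 9 ^ m = n / 9 ^ (m+1) := by
        rw [Int.ediv_ediv_of_nonneg (by norm_num : (0:Int) ≤ 9)]
        congr 1
        rw [pow_succ]
        ring
      set r := n % 9 ^ (m+1) with hr
      have hrnn : 0 ≤ r := Int.emod_nonneg n (by positivity)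
      have hq : r = n - 9 ^ (m+1) * (n / 9 ^ (m+1)) := Int.emod_def n (9 ^ (m+1))
      have hrdiv : r / 9 = n / 9 % 9 ^ m := by
        have h1 : r = n + (-(9 ^ m * (n / 9 ^ (m+1)))) * 9 := by
          rw [hq, pow_succ]; ring
        rw [h1, Int.add_mul_ediv_right _ _ (by norm_num : (9:Int) ≠ 0),
            Int.emod_def (n / 9) (9 ^ m), hdd]
        ring
      have hrmod : r % 9 = n % 9 := by
        rw [hr, Int.emod_emod_of_dvd n (dvd_pow_self (9:Int) (Nat.succ_ne_zero m))]
      have hpf0 : pvF 0 = 0 := by rw [pvF]; simp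
      have hL : pvF n = pvF (n / 9) * 10 + n % 9 := by
        rw [pvF, dif_neg h0, PySem.Int.floordiv_eq_ediv_of_pos (by norm_num),
            PySem.Int.mod_eq_emod_of_pos (by norm_num)]
      have hres : pvF r = pvF (n / 9 % 9 ^ m) * 10 + n % 9 := by
        by_cases hr0 : r ≤ 0
        · have hre : r = 0 := le_antisymm hr0 hrnn
          have hm9 : n % 9 = 0 := by rw [← hrmod, hre]; simp
          have hdm : n / 9 % 9 ^ m = 0 := by rw [← hrdiv, hre]; simp
          rw [hre, hm9, hdm, hpf0]
          ring
        · rw [pvF, dif_neg hr0, PySem.Int.floordiv_eq_ediv_of_pos (by norm_num),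
              PySem.Int.mod_eq_emod_of_pos (by norm_num), hrdiv, hrmod]
      rw [hL, ih (n / 9) (Int.ediv_nonneg hn (by norm_num)), hdd, hres]
      ring

theorem pvReadB_spec (k : ℕ) (n ans : Int) (hn : 0 ≤ n) (hub : n < 9 ^ (k+1)) :
    pvReadB ((9:Int) ^ k) n ans = ans * 10 ^ (k+1) + pvF n := by
  induction k generalizing n ans with
  | zero =>
    rw [pvReadB, dif_neg (by norm_num : ¬ (9:Int)^0 ≤ 0)]
    have e1 : PySem.Int.floordiv ((9:Int)^0) 9 = 0 := by
      rw [PySem.Int.floordiv_eq_ediv_of_pos (by norm_num)]; norm_num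
    have e2 : PySem.Int.mod n ((9:Int)^0) = 0 := by
      rw [PySem.Int.mod_eq_emod_of_pos (by norm_num)]; simp
    have e3 : PySem.Int.floordiv n ((9:Int)^0) = n := by
      rw [PySem.Int.floordiv_eq_ediv_of_pos (by norm_num)]; simp
    rw [e1, e2, e3, pvReadB]
    simp only [le_refl, dite_true]
    have hub9 : n < 9 := by simpa using hub
    rw [pvF_small n hn hub9]
    ring
  | succ k ih =>
    have hP1 : (0:Int) < 9 ^ (k+1) := by positivity
    rw [pvReadB, dif_neg (not_le.mpr hP1)]
    have e1 : PySem.Int.floordiv ((9:Int)^(k+1)) 9 = 9 ^ k := by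
      rw [PySem.Int.floordiv_eq_ediv_of_pos (by norm_num), pow_succ,
          Int.mul_ediv_cancel _ (by norm_num)]
    have e2 : PySem.Int.mod n ((9:Int)^(k+1)) = n % 9 ^ (k+1) :=
      PySem.Int.mod_eq_emod_of_pos hP1
    have e3 : PySem.Int.floordiv n ((9:Int)^(k+1)) = n / 9 ^ (k+1) :=
      PySem.Int.floordiv_eq_ediv_of_pos hP1
    rw [e1, e2, e3,
        ih (n % 9 ^ (k+1)) _ (Int.emod_nonneg n (by positivity)) (Int.emod_lt_of_pos n hP1)]
    have hd0 : 0 ≤ n / 9 ^ (k+1) := Int.ediv_nonneg hn (le_of_lt hP1)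
    have hd9 : n / 9 ^ (k+1) < 9 := by
      rw [Int.ediv_lt_iff_lt_mul hP1]
      calc n < 9 ^ (k+1+1) := hub
        _ = 9 * 9 ^ (k+1) := by rw [pow_succ]; ring
    rw [pvF_split (k+1) n hn, pvF_small _ hd0 hd9]
    ring

theorem pvPow9_spec (n p : Int) (hk : ∃ k : ℕ, p = (9:Int) ^ k) (hpn : p ≤ n) :
    ∃ k : ℕ, pvPow9 n p = 9 ^ k ∧ (9:Int) ^ k ≤ n ∧ n < 9 ^ (k+1) := by
  obtain ⟨j, rfl⟩ := hk
  have hp : (0:Int) < 9 ^ j := by positivity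
  rw [pvPow9]
  by_cases h : (9:Int) ^ j * 9 ≤ n ∧ 0 < (9:Int) ^ j
  · rw [dif_pos h]
    have : (9:Int) ^ j * 9 = 9 ^ (j+1) := by rw [pow_succ]
    exact pvPow9_spec n ((9:Int) ^ j * 9) ⟨j+1, this⟩ (by omega)
  · rw [dif_neg h]
    refine ⟨j, rfl, hpn, ?_⟩
    rw [pow_succ]
    by_contra hc
    exact h ⟨not_lt.mp hc, hp⟩
termination_by (n.toNat + 1 - p.toNat)
decreasing_by
  obtain ⟨h1, _h2⟩ := h
  omega

theorem pvB_eval (n : Int) (hn : 0 ≤ n) : newInteger_alt n = pvF n := by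
  unfold newInteger_alt
  by_cases h0 : n = 0
  · subst h0
    rw [if_pos rfl, pvF]
    simp
  · rw [if_neg h0]
    obtain ⟨k, hpk, hlb, hub⟩ := pvPow9_spec n 1 ⟨0, by norm_num⟩ (by omega)
    rw [hpk, pvReadB_spec k n 0 hn hub]
    ring

-- ===== VERDICT =====
theorem newInteger_spec : Claim_equal_newInteger := by
  intro n _hDom hPre
  unfold Spec_newInteger
  rw [pvA_eval, pvB_eval n hPre]
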